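-- pv_equiv track=rewrite | github.com/WildBerries/ko.ok | lines/views.py | toolsInColumns
-- ===== SOURCE A (Python) =====
-- def toolsInColumns(tools_str, two_or_thee):
--     """ Cleans and Split data into tuples.
--         Items stored per tuple according to integer variable.
--     """
--     tools_clean = [tool.strip().lower().capitalize() for tool in tools_str.split(',')]
--     """
--     # removes duplicates
--     for i in tools_clean:
--         while tools_clean.count(i) > 1:
--             tools_clean.remove(i)
--     """
--     tools = ['{}. {}'.format(i + 1, tools_clean[i]) for i in range(len(tools_clean))]
--
--     cut = int(len(tools)/2) + 1 if len(tools) % 2 else int((len(tools)/2))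
--     first = tools[:cut]
--     second = tools[cut:]
--
--     if len(first) == len(second):
--         result = list(zip(first, second))
--     else:
--         result = list(zip(first, second)) + [(first[-1], '')]
--
--     return result
-- ===== SOURCE B (Python) =====
-- def toolsInColumns(tools_str, two_or_thee):
--     """Single mutating pass: the left half appends [label, ''] rows; each
--     right-half item overwrites the empty slot of its row in place.
--     No intermediate numbered list, no slicing, no zip, no pad branch."""
--     cleaned = [t.strip().capitalize() for t in tools_str.split(',')]
--     cut = (len(cleaned) + 1) // 2
--     rows = []
--     for i, name in enumerate(cleaned):
--         label = '{}. {}'.format(i + 1, name)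
--         if i < cut:
--             rows.append([label, ''])
--         else:
--             rows[i - cut][1] = label
--     return [(left, right) for left, right in rows]
-- ===== Notes on version B (the rewrite author's own statement) =====
-- stated objective: alternative
-- what changed: B replaces A's staged pipeline (numbered list, two slice halves, zip, explicit ('last','') pad branch) by one mutating pass: left-half items append ['label',''] rows and each right-half item overwrites the empty slot of row i-cut in place, so the padding falls out for free; the redundant .lower() before .capitalize() is dropped.
import Mathlib
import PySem

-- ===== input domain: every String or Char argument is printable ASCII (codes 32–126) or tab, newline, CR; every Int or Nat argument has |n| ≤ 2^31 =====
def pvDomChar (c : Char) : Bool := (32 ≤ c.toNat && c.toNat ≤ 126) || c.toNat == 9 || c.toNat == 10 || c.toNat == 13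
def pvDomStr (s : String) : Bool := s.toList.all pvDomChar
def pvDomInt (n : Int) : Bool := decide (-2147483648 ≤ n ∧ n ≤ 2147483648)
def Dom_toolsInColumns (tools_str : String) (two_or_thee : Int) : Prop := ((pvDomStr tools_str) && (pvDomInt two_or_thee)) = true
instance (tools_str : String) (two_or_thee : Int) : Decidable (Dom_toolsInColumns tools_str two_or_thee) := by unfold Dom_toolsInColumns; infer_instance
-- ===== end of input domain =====

-- B replaces A's numbered list / two slice halves / zip / pad branch by one mutating pass:
-- left-half items append ['label',''] rows, right-half items overwrite their row's empty slot
-- in place (objective: alternative; same O(n) cost).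

-- ===== PORT A =====
-- str.capitalize(): first char upper-cased, rest lower-cased (PySem's ASCII case maps; exact on the stated ASCII domain)
def pvCapitalize (cs : List Char) : List Char :=
  match cs with
  | [] => []
  | c :: rest => PySem.Chars.upperChar c :: PySem.Chars.lower rest

def toolsInColumns (tools_str : String) (two_or_thee : Int) : List (String × String) :=
  -- tools_clean = [tool.strip().lower().capitalize() for tool in tools_str.split(',')]
  let tools_clean : List String :=
    (PySem.Chars.splitOn tools_str.toList [',']).map
      (fun t => String.mk (pvCapitalize (PySem.Chars.lower (PySem.Chars.strip t))))
  -- tools = ['{}. {}'.format(i + 1, tools_clean[i]) for i in range(len(tools_clean))]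
  let tools : List String :=
    (PySem.List.pyRange 0 (tools_clean.length : Int) 1).map
      (fun i => PySem.Int.toStr (i + 1) ++ ". " ++ PySem.List.pyGetD tools_clean i "")
  -- cut = int(len(tools)/2) + 1 if len(tools) % 2 else int(len(tools)/2)   (len ≥ 0, so int(·/2) is floor division)
  let cut : Int :=
    if ((tools.length : Int) % 2) ≠ 0 then (tools.length : Int) / 2 + 1 else (tools.length : Int) / 2
  let first := PySem.List.slice tools none (some cut)
  let second := PySem.List.slice tools (some cut) none
  if first.length = second.length then first.zip second
  else
    -- first[-1]: pyGet? is none only for empty `first`, which this branch never reaches (odd length ⇒ cut ≥ 1)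
    first.zip second ++ [((PySem.List.pyGet? first (-1)).getD "", "")]

-- ===== PORT B =====
def toolsInColumns_alt (tools_str : String) (two_or_thee : Int) : List (String × String) :=
  -- cleaned = [t.strip().capitalize() for t in tools_str.split(',')]
  let cleaned : List String :=
    (PySem.Chars.splitOn tools_str.toList [',']).map
      (fun t => String.mk (pvCapitalize (PySem.Chars.strip t)))
  -- cut = (len(cleaned) + 1) // 2 : both operands ≥ 0, so Lean's Int `/` equals Python's `//`
  let cut : Int := ((cleaned.length : Int) + 1) / 2
  -- for i, name in enumerate(cleaned): append [label,''] on the left half, else rows[i-cut][1] = label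
  let rows : List (String × String) :=
    (PySem.List.enumerate cleaned).foldl
      (fun rows p =>
        let label := PySem.Int.toStr (p.1 + 1) ++ ". " ++ p.2
        if p.1 < cut then rows ++ [(label, "")]
        else
          -- rows[i - cut][1] = label: the Python index i - cut is always in range here,
          -- where List.modify is an exact port of the in-place assignment
          rows.modify ((p.1 - cut).toNat) (fun q => (q.1, label))) []
  -- return [(left, right) for left, right in rows]
  rows.map (fun q => (q.1, q.2))

-- ===== PRECONDITION & SPEC =====
def Spec_toolsInColumns (tools_str : String) (two_or_thee : Int) (out : List (String × String)) : Prop := out = toolsInColumns_alt tools_str two_or_thee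
instance (tools_str : String) (two_or_thee : Int) (out : List (String × String)) : Decidable (Spec_toolsInColumns tools_str two_or_thee out) := by unfold Spec_toolsInColumns; infer_instance

-- ===== CLAIM (what is proved, stated in full; the proofs are below) =====
def Claim_equal_toolsInColumns : Prop := ∀ (tools_str : String) (two_or_thee : Int), Dom_toolsInColumns tools_str two_or_thee → Spec_toolsInColumns tools_str two_or_thee (toolsInColumns tools_str two_or_thee)

-- ===== LEMMAS AND PROOFS =====

lemma pvUpperLower (c : Char) :
    PySem.Chars.upperChar (PySem.Chars.lowerChar c) = PySem.Chars.upperChar c := by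
  simp only [PySem.Chars.lowerChar, PySem.Chars.upperChar, PySem.Chars.isupper, PySem.Chars.islower]
  by_cases h1 : 'A' ≤ c <;> by_cases h2 : c ≤ 'Z' <;> simp [h1, h2]
  have hb1 : 65 ≤ c.toNat := by rw [Char.le_def] at h1; exact h1
  have hb2 : c.toNat ≤ 90 := by rw [Char.le_def] at h2; exact h2
  have hval : (Char.ofNat (c.toNat + 32)).toNat = c.toNat + 32 := by
    rw [Char.toNat_ofNat, if_pos]; exact Or.inl (by omega)
  have hlo : ('a' ≤ Char.ofNat (c.toNat + 32)) := by
    rw [Char.le_def]; show 97 ≤ (Char.ofNat (c.toNat + 32)).toNat; omega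
  have hhi : (Char.ofNat (c.toNat + 32)) ≤ 'z' := by
    rw [Char.le_def]; show (Char.ofNat (c.toNat + 32)).toNat ≤ 122; omega
  have hnl : ¬ ('a' ≤ c) := by
    intro hc; rw [Char.le_def] at hc
    have : 97 ≤ c.toNat := hc
    omega
  simp [hlo, hhi, hnl, hval, Char.ofNat_toNat]

lemma pvLowerLower (c : Char) :
    PySem.Chars.lowerChar (PySem.Chars.lowerChar c) = PySem.Chars.lowerChar c := by
  simp only [PySem.Chars.lowerChar, PySem.Chars.isupper]
  by_cases h1 : 'A' ≤ c <;> by_cases h2 : c ≤ 'Z' <;> simp [h1, h2]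
  have hb1 : 65 ≤ c.toNat := by rw [Char.le_def] at h1; exact h1
  have hb2 : c.toNat ≤ 90 := by rw [Char.le_def] at h2; exact h2
  have hval : (Char.ofNat (c.toNat + 32)).toNat = c.toNat + 32 := by
    rw [Char.toNat_ofNat, if_pos]; exact Or.inl (by omega)
  intro ha hb
  rw [Char.le_def] at hb
  have hle : (Char.ofNat (c.toNat + 32)).toNat ≤ 90 := hb
  exact absurd hle (by rw [hval]; omega)

-- A's .lower() before .capitalize() is a no-op: capitalize lower-cases the tail itself
lemma pvCapLower (cs : List Char) :
    pvCapitalize (PySem.Chars.lower cs) = pvCapitalize cs := by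
  cases cs with
  | nil => rfl
  | cons c rest =>
    show PySem.Chars.upperChar (PySem.Chars.lowerChar c) :: PySem.Chars.lower (PySem.Chars.lower rest)
        = PySem.Chars.upperChar c :: PySem.Chars.lower rest
    rw [pvUpperLower]
    simp only [PySem.Chars.lower, List.map_map]
    exact congrArg _ (List.map_congr_left (fun a _ => pvLowerLower a))

-- A's slice/zip/pad construction equals a single map over range(ceil(n/2))
set_option maxHeartbeats 1000000 in
lemma pvMain (L : List String) :
    (let tools : List String :=
      (PySem.List.pyRange 0 (L.length : Int) 1).map
        (fun i => PySem.Int.toStr (i + 1) ++ ". " ++ PySem.List.pyGetD L i "")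
     let cut : Int :=
       if ((tools.length : Int) % 2) ≠ 0 then (tools.length : Int) / 2 + 1 else (tools.length : Int) / 2
     let first := PySem.List.slice tools none (some cut)
     let second := PySem.List.slice tools (some cut) none
     if first.length = second.length then first.zip second
     else first.zip second ++ [((PySem.List.pyGet? first (-1)).getD "", "")])
    =
    (let n : Int := L.length
     let cut : Int := (n + 1) / 2
     let fmt : Int → String := fun i => PySem.Int.toStr (i + 1) ++ ". " ++ PySem.List.pyGetD L i ""
     (PySem.List.pyRange 0 cut 1).map
       (fun r => (fmt r, if r + cut < n then fmt (r + cut) else ""))) := by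
  have hsplit : ∀ (m : Nat),
      (if ¬((m : Int) % 2 = 0) then (m : Int) / 2 + 1 else (m : Int) / 2) = (((m + 1) / 2 : Nat) : Int) := by
    intro m; split_ifs with h <;> omega
  have hplus : ∀ (m : Nat), ((m : Int) + 1) / 2 = (((m + 1) / 2 : Nat) : Int) := by
    intro m; omega
  simp only [PySem.List.pyRange_zero, Int.toNat_natCast, List.map_map, List.length_map,
    List.length_range, Function.comp_def, PySem.List.pyGetD_natCast, hsplit, hplus,
    PySem.List.slice_to, PySem.List.slice_from, Int.natCast_nonneg,
    List.length_take, List.length_drop]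
  simp only [← Nat.cast_add, PySem.List.pyGetD_natCast, Nat.cast_lt]
  rw [min_eq_left (by omega : (L.length + 1) / 2 ≤ L.length)]
  set n := L.length with hn
  set c := (n + 1) / 2 with hc
  by_cases h : c = n - c
  · rw [if_pos h]
    apply List.ext_getElem
    · simp; omega
    · intro k h1 h2
      have hkc : k < c := by simp at h2; exact h2
      have h3 : k + c < n := by omega
      simp only [List.getElem_zip, List.getElem_take, List.getElem_drop, List.getElem_map,
        List.getElem_range]
      rw [Nat.add_comm c k, if_pos h3]
  · rw [if_neg h]
    have hodd : n = 2 * c - 1 ∧ 1 ≤ c := by omega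
    apply List.ext_getElem
    · simp; omega
    · intro k h1 h2
      have hkc : k < c := by simp at h2; exact h2
      by_cases hk : k < c - 1
      · rw [List.getElem_append_left (by simp; omega)]
        simp only [List.getElem_zip, List.getElem_take, List.getElem_drop, List.getElem_map,
          List.getElem_range]
        rw [Nat.add_comm c k, if_pos (by omega)]
      · have hke : k = c - 1 := by omega
        subst hke
        rw [List.getElem_append_right (by simp; omega)]
        have hget : PySem.List.pyGet?
            (List.take c (List.map (fun x : Nat => PySem.Int.toStr ((x : Int) + 1) ++ ". " ++ L.getD x "") (List.range n)))
            (-1) = some (PySem.Int.toStr (((c - 1 : Nat) : Int) + 1) ++ ". " ++ L.getD (c - 1) "") := by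
          have hl : (List.take c (List.map (fun x : Nat => PySem.Int.toStr ((x : Int) + 1) ++ ". " ++ L.getD x "") (List.range n))).length = c := by
            simp; omega
          have e1 : ¬ ((0:Int) ≤ -1) := by omega
          simp only [PySem.List.pyGet?, PySem.List.pyIdx?, hl, e1, if_false]
          rw [if_pos (by omega : -(c : Int) ≤ -1)]
          simp only [Int.neg_neg, Int.toNat_one, Option.bind]
          rw [List.getElem?_eq_getElem (by rw [hl]; omega)]
          simp only [List.getElem_take, List.getElem_map, List.getElem_range]
        simp only [hget, Option.getD_some, List.getElem_singleton, List.getElem_map,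
          List.getElem_range]
        rw [if_neg (by omega)]

-- B's fold step over Nat indices (proof-side abbreviation of the composed step)
def pvStep (c : Nat) (g : Nat → String) :
    List (String × String) → Nat → List (String × String) :=
  fun rows j =>
    if (j : Int) < (c : Int) then rows ++ [(g j, "")]
    else rows.modify (((j : Int) - (c : Int)).toNat) (fun q => (q.1, g j))

-- phase 1: indices below the cut only append
lemma pvPhase1 (c : Nat) (g : Nat → String) (js : List Nat) (acc : List (String × String))
    (h : ∀ j ∈ js, j < c) :
    js.foldl (pvStep c g) acc = acc ++ js.map (fun j => (g j, "")) := by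
  induction js generalizing acc with
  | nil => simp
  | cons j js ih =>
    have hj : j < c := h j (by simp)
    simp only [List.foldl_cons, List.map_cons]
    rw [pvStep, if_pos (by exact_mod_cast hj), ih _ (fun a ha => h a (by simp [ha]))]
    simp

-- phase 2: indices ≥ cut fill the second column of row j - cut in place
lemma pvPhase2 (c : Nat) (g : Nat → String) (m : Nat) :
    ((List.range m).map (fun j => c + j)).foldl (pvStep c g)
        ((List.range c).map (fun r => (g r, "")))
    = (List.range c).map (fun r => (g r, if r < m then g (c + r) else "")) := by
  induction m with
  | zero => simp
  | succ m ih =>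
    rw [List.range_succ, List.map_append, List.foldl_append, ih]
    simp only [List.map_cons, List.map_nil, List.foldl_cons, List.foldl_nil]
    rw [pvStep, if_neg (by push_cast; omega)]
    have hidx : (((c + m : Nat) : Int) - (c : Int)).toNat = m := by omega
    rw [hidx]
    apply List.ext_getElem
    · simp
    · intro k h1 h2
      have hk : k < c := by simpa using h2
      simp only [List.getElem_modify, List.getElem_map, List.getElem_range]
      by_cases hm : m = k
      · subst hm; simp
      · rw [if_neg hm]
        have : k < m ↔ k < m + 1 := by omega
        simp [this]

-- B's single mutating pass equals the same map over range(ceil(n/2))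
lemma pvAlt (L : List String) :
    (let cut : Int := ((L.length : Int) + 1) / 2
     let rows : List (String × String) :=
       (PySem.List.enumerate L).foldl
         (fun rows p =>
           let label := PySem.Int.toStr (p.1 + 1) ++ ". " ++ p.2
           if p.1 < cut then rows ++ [(label, "")]
           else rows.modify ((p.1 - cut).toNat) (fun q => (q.1, label))) []
     rows.map (fun q => (q.1, q.2)))
    =
    (let n : Int := L.length
     let cut : Int := (n + 1) / 2
     let fmt : Int → String := fun i => PySem.Int.toStr (i + 1) ++ ". " ++ PySem.List.pyGetD L i ""
     (PySem.List.pyRange 0 cut 1).map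
       (fun r => (fmt r, if r + cut < n then fmt (r + cut) else ""))) := by
  have hplus : ((L.length : Int) + 1) / 2 = (((L.length + 1) / 2 : Nat) : Int) := by omega
  set n := L.length with hn
  set c := (n + 1) / 2 with hc
  have hcn : c ≤ n := by omega
  set g : Nat → String := fun j => PySem.Int.toStr ((j : Int) + 1) ++ ". " ++ L.getD j "" with hg
  -- normalize the left side to a fold of pvStep over List.range n
  rw [show (PySem.List.enumerate L) = PySem.List.enumerate L 0 from rfl,
      PySem.List.enumerate_eq_map_pyRange L ""]
  simp only [PySem.List.len, PySem.List.pyRange_zero, Int.toNat_natCast, List.map_map,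
    List.foldl_map, Function.comp_def, PySem.List.pyGetD_natCast, hplus]
  have hstep : (List.range n).foldl
      (fun rows (j : Nat) =>
        if (j : Int) < ((c : Nat) : Int) then
          rows ++ [(PySem.Int.toStr ((j : Int) + 1) ++ ". " ++ L.getD j "", "")]
        else rows.modify (((j : Int) - ((c : Nat) : Int)).toNat)
          (fun q => (q.1, PySem.Int.toStr ((j : Int) + 1) ++ ". " ++ L.getD j "")))
      [] = (List.range c).map (fun r => (g r, if r < n - c then g (c + r) else "")) := by
    have hr : List.range n = List.range c ++ (List.range (n - c)).map (fun j => c + j) := by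
      rw [← List.range_add, Nat.add_sub_cancel' hcn]
    rw [show (fun rows (j : Nat) =>
        if (j : Int) < ((c : Nat) : Int) then
          rows ++ [(PySem.Int.toStr ((j : Int) + 1) ++ ". " ++ L.getD j "", "")]
        else rows.modify (((j : Int) - ((c : Nat) : Int)).toNat)
          (fun q => (q.1, PySem.Int.toStr ((j : Int) + 1) ++ ". " ++ L.getD j ""))) = pvStep c g from rfl,
      hr, List.foldl_append,
      pvPhase1 c g (List.range c) [] (fun j hj => List.mem_range.mp hj),
      List.nil_append, pvPhase2]
  rw [hstep]
  -- normalize the right side the same way and compare entrywise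
  simp only [PySem.List.pyRange_zero, Int.toNat_natCast, List.map_map, Function.comp_def,
    List.map_id']
  apply List.ext_getElem
  · simp
  · intro k h1 h2
    have hk : k < c := by simpa using h1
    simp only [List.getElem_map, List.getElem_range, hg]
    have hlt : k < n - c ↔ ((k : Nat) : Int) + (c : Int) < (n : Int) := by
      constructor <;> intro <;> omega
    by_cases hcase : k < n - c
    · rw [if_pos hcase, if_pos (by push_cast at hlt ⊢; omega)]
      simp only [← Nat.cast_add, PySem.List.pyGetD_natCast, Nat.add_comm c k]
    · rw [if_neg hcase, if_neg (by push_cast at hlt ⊢; omega)]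

-- ===== VERDICT (by name: the statement is the Claim_ definition above) =====
theorem toolsInColumns_spec : Claim_equal_toolsInColumns := by
  intro s t _
  unfold Spec_toolsInColumns
  simp only [toolsInColumns, toolsInColumns_alt, pvCapLower]
  exact (pvMain _).trans (pvAlt _).symm
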